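-- pv_equiv track=rewrite | github.com/sion9262/TIL | algorithm/Greedy/problems/창고정리.py | solve
-- ===== SOURCE A (Python) =====
-- def solve(boxs, l, m):
--     answer = 999999
--     boxs.sort()
--     for i in range(m):
--         boxs[0] += 1
--         boxs[-1] -= 1
--         boxs.sort()
--     answer = boxs[-1] - boxs[0]
--     return answer
-- ===== SOURCE B (Python) =====
-- def _shift(cnt, k, d):
--     cnt[k] -= 1
--     cnt[k + d] = cnt.get(k + d, 0) + 1
--     if cnt[k] == 0:
--         del cnt[k]
--         k += d
--     return k
--
--
-- def solve(boxs, l, m):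
--     n = len(boxs)
--     if n == 1:
--         return 0
--     cnt = {}
--     for x in boxs:
--         cnt[x] = cnt.get(x, 0) + 1
--     lo = min(boxs)
--     hi = max(boxs)
--     r = m
--     while r > 0 and hi - lo >= 2:
--         lo = _shift(cnt, lo, 1)
--         hi = _shift(cnt, hi, -1)
--         r -= 1
--     if hi - lo == 1:
--         return 1
--     if hi == lo:
--         return 2 if r > 0 and r % 2 == 1 else 0
--     return hi - lo
-- ===== Notes on version B (the rewrite author's own statement) =====
-- stated objective: faster
-- what changed: B never sorts or maintains the list: it builds a value->count dictionary once, tracks only the current min and max and moves one unit per step between buckets in O(1), stopping early as soon as max-min <= 1 because from there the process is a fixed point (spread 1) or a 2-cycle (spread 0) whose final spread is given by the parity of the remaining steps.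
import Mathlib
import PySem

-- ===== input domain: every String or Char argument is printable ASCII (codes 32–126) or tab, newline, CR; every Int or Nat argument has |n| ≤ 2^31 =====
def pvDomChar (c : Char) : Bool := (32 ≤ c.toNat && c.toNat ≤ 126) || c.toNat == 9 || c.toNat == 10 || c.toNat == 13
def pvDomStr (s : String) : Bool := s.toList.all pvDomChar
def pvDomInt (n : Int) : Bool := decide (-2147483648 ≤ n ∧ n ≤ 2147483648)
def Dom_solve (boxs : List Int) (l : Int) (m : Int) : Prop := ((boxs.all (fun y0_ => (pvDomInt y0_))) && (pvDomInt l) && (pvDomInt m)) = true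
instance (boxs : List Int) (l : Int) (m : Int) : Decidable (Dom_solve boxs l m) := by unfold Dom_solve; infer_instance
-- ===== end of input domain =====

-- B replaces A's per-step re-sort of the whole list by a value->count dictionary with
-- incrementally tracked min/max and an early stop once max-min <= 1 (from there the
-- process is a fixed point or a 2-cycle, resolved by the parity of the remaining steps);
-- objective: faster. A sorts its argument list in place; the equivalence proved here is
-- about the RETURN value only.


-- ===== PORT A =====
-- loop body of A: boxs[0] += 1; boxs[-1] -= 1; boxs.sort()
def solveStepA (s : List Int) : List Int :=
  let s1 := s.set 0 (s.getD 0 0 + 1)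
  let s2 := s1.set (s1.length - 1) (s1.getD (s1.length - 1) 0 - 1)
  PySem.List.sorted s2 (fun x => x) false

def solve (boxs : List Int) (l : Int) (m : Int) : Int :=
  let _answer : Int := 999999
  let s := PySem.List.sorted boxs (fun x => x) false
  let f := (PySem.List.pyRange 0 m 1).foldl (fun s _ => solveStepA s) s
  f.getD (f.length - 1) 0 - f.getD 0 0

-- ===== PORT B =====
-- cnt[x] = cnt.get(x, 0) + 1 over boxs
def buildCnt (boxs : List Int) : PySem.Dict Int Int :=
  boxs.foldl (fun d x => d.insert x (d.getD x 0 + 1)) PySem.Dict.empty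

-- body of B's while loop for one end: cnt[k] -= 1; cnt[k+d] = cnt.get(k+d,0)+1;
-- if cnt[k] == 0: del cnt[k]; k += d   (returns the new dict and the new k)
def shiftB (cnt : PySem.Dict Int Int) (k d : Int) : PySem.Dict Int Int × Int :=
  let c1 := cnt.insert k (cnt.getD k 0 - 1)
  let c2 := c1.insert (k + d) (c1.getD (k + d) 0 + 1)
  if c2.getD k 0 == 0 then (c2.erase k, k + d) else (c2, k)

-- B's while loop: while r > 0 and hi - lo >= 2: lo = _shift(cnt,lo,1); hi = _shift(cnt,hi,-1)
def loopB (cnt : PySem.Dict Int Int) (lo hi r : Int) : Int × Int × Int :=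
  if h : 0 < r ∧ 2 ≤ hi - lo then
    loopB (shiftB (shiftB cnt lo 1).1 hi (-1)).1 (shiftB cnt lo 1).2
      (shiftB (shiftB cnt lo 1).1 hi (-1)).2 (r - 1)
  else (lo, hi, r)
termination_by r.toNat
decreasing_by omega

def solve_alt (boxs : List Int) (l : Int) (m : Int) : Int :=
  if boxs.length == 1 then 0
  else
    let cnt := buildCnt boxs
    let lo := (PySem.List.min? boxs (fun x => x)).getD 0
    let hi := (PySem.List.max? boxs (fun x => x)).getD 0
    let res := loopB cnt lo hi m
    if res.2.1 - res.1 == 1 then 1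
    else if res.2.1 == res.1 then
      (if 0 < res.2.2 ∧ PySem.Int.mod res.2.2 2 = 1 then 2 else 0)
    else res.2.1 - res.1

-- ===== PRECONDITION & SPEC =====
-- A raises IndexError on the empty list (boxs[0] / boxs[-1]); B raises there too (min([])).
def Pre_solve (boxs : List Int) (l : Int) (m : Int) : Prop := boxs ≠ []
instance (boxs : List Int) (l : Int) (m : Int) : Decidable (Pre_solve boxs l m) := by unfold Pre_solve; infer_instance
def pvWitness_solve : List Int × Int × Int := ([3, 1, 2], 3, 2)

def Spec_solve (boxs : List Int) (l : Int) (m : Int) (out : Int) : Prop := out = solve_alt boxs l m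
instance (boxs : List Int) (l : Int) (m : Int) (out : Int) : Decidable (Spec_solve boxs l m out) := by unfold Spec_solve; infer_instance

-- ===== CLAIM (what is proved, stated in full; the proofs are below) =====
def Claim_equal_solve : Prop := ∀ (boxs : List Int) (l : Int) (m : Int), Dom_solve boxs l m → Pre_solve boxs l m → Spec_solve boxs l m (solve boxs l m)

-- ===== LEMMAS AND PROOFS =====

-- a foldl that ignores the list elements is function iteration
theorem foldl_ignore {α β : Type} (f : α → α) (xs : List β) (s : α) :
    xs.foldl (fun t _ => f t) s = f^[xs.length] s := by
  induction xs generalizing s with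
  | nil => rfl
  | cons x xs ih => simpa [Function.iterate_succ_apply] using ih (f s)

theorem set_last (b v : Int) (mid : List Int) : (mid ++ [b]).set mid.length v = mid ++ [v] := by
  induction mid with
  | nil => simp
  | cons x xs ih => simp [ih]

theorem getD_last (b : Int) (mid : List Int) : (mid ++ [b]).getD mid.length 0 = b := by
  induction mid with
  | nil => simp
  | cons x xs ih => simpa using ih

theorem stepA_eq (a b : Int) (mid : List Int) :
    solveStepA (a :: (mid ++ [b])) = PySem.List.sorted ((a + 1) :: (mid ++ [b - 1])) (fun x => x) false := by
  simp only [solveStepA, List.getD_cons_zero, List.set_cons_zero, List.length_cons,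
    List.length_append, List.length_nil, Nat.zero_add, Nat.add_sub_cancel]
  simp only [List.getD_cons_succ, List.set_cons_succ, getD_last, set_last]

theorem stepA_singleton (a : Int) : solveStepA [a] = [a] := by
  have h : a + 1 - 1 = a := by ring
  simp only [solveStepA, List.length_singleton, Nat.sub_self, List.set_cons_zero,
    List.getD_cons_zero, h]
  exact PySem.List.sorted_eq_self_of_pairwise _ _ (by simp)

theorem getD_pred_eq_getLastD : ∀ (a : Int) (t : List Int),
    (a :: t).getD ((a :: t).length - 1) 0 = (a :: t).getLastD 0 := by
  intro a t
  induction t generalizing a with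
  | nil => simp
  | cons b u ih => simpa using ih b

theorem lastD_cons_append (a b : Int) (mid : List Int) :
    ((a :: (mid ++ [b])) : List Int).getLastD 0 = b := by
  have h : a :: (mid ++ [b]) = (a :: mid) ++ [b] := rfl
  rw [h, List.getLastD_concat]

theorem lastD_mem (t : List Int) (h : t ≠ []) : t.getLastD 0 ∈ t := by
  induction t with
  | nil => exact absurd rfl h
  | cons a u ih =>
    cases u with
    | nil => simp
    | cons b v => simpa using Or.inr (ih (by simp))

theorem head_le_of_pairwise (a : Int) (u : List Int) (hp : (a :: u).Pairwise (· ≤ ·)) :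
    ∀ x ∈ a :: u, a ≤ x := by
  intro x hx
  rcases List.mem_cons.mp hx with rfl | hxu
  · exact le_refl x
  · exact (List.pairwise_cons.mp hp).1 x hxu

theorem le_lastD_of_pairwise (t : List Int) (hp : t.Pairwise (· ≤ ·)) :
    ∀ x ∈ t, x ≤ t.getLastD 0 := by
  induction t with
  | nil => intro x hx; simp at hx
  | cons a u ih =>
    intro x hx
    cases u with
    | nil => simp at hx; simp [hx]
    | cons b v =>
      rcases List.mem_cons.mp hx with rfl | hxu
      · have h1 : x ≤ b := (List.pairwise_cons.mp hp).1 b (by simp)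
        have h2 : b ≤ (b :: v).getLastD 0 :=
          ih (List.pairwise_cons.mp hp).2 b (by simp)
        simpa using le_trans h1 h2
      · simpa using ih (List.pairwise_cons.mp hp).2 x hxu

theorem headD_eq_of_min (t : List Int) (hp : t.Pairwise (· ≤ ·)) (v : Int)
    (hv : v ∈ t) (hmin : ∀ x ∈ t, v ≤ x) : t.headD 0 = v := by
  cases t with
  | nil => simp at hv
  | cons a u =>
    have h1 : a ≤ v := head_le_of_pairwise a u hp v hv
    have h2 : v ≤ a := hmin a (by simp)
    simpa using le_antisymm h1 h2

theorem lastD_eq_of_max (t : List Int) (hp : t.Pairwise (· ≤ ·)) (v : Int)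
    (hv : v ∈ t) (hmax : ∀ x ∈ t, x ≤ v) : t.getLastD 0 = v := by
  have hne : t ≠ [] := by intro h; subst h; simp at hv
  have h1 : t.getLastD 0 ≤ v := hmax _ (lastD_mem t hne)
  have h2 : v ≤ t.getLastD 0 := le_lastD_of_pairwise t hp v hv
  exact le_antisymm h1 h2

theorem headD_le_lastD (t : List Int) (hp : t.Pairwise (· ≤ ·)) (hne : t ≠ []) :
    t.headD 0 ≤ t.getLastD 0 := by
  cases t with
  | nil => exact absurd rfl hne
  | cons a u => exact head_le_of_pairwise a u hp _ (lastD_mem _ hne)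

-- destructure a sorted list of length ≥ 2 with known ends
theorem destruct_sorted (s : List Int) (hl : 2 ≤ s.length) :
    ∃ mid, s = (s.headD 0) :: (mid ++ [s.getLastD 0]) := by
  cases s with
  | nil => simp at hl
  | cons a t =>
    have ht : t ≠ [] := by intro h; subst h; simp at hl
    obtain ⟨mid, b, rfl⟩ : ∃ mid b, t = mid ++ [b] :=
      ⟨t.dropLast, t.getLast ht, (List.dropLast_append_getLast ht).symm⟩
    refine ⟨mid, ?_⟩
    simp only [List.headD_cons, lastD_cons_append]

-- all-equal list when head = last
theorem all_eq_of_ends (s : List Int) (hp : s.Pairwise (· ≤ ·)) (a : Int)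
    (hh : s.headD 0 = a) (ht : s.getLastD 0 = a) : ∀ x ∈ s, x = a := by
  intro x hx
  cases s with
  | nil => simp at hx
  | cons c u =>
    have h1 : c ≤ x := head_le_of_pairwise c u hp x hx
    have h2 : x ≤ (c :: u).getLastD 0 := le_lastD_of_pairwise _ hp x hx
    simp only [List.headD_cons] at hh
    omega

-- the per-step multiset image of A's step on a sorted list of length ≥ 2
theorem stepA_perm (lo hi : Int) (mid : List Int)
    (hp : ((lo :: (mid ++ [hi])) : List Int).Pairwise (· ≤ ·)) :
    (solveStepA (lo :: (mid ++ [hi]))).Perm ((lo + 1) :: (mid ++ [hi - 1])) := by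
  rw [stepA_eq]
  exact PySem.List.sorted_perm _ _ _

theorem stepA_pairwise (lo hi : Int) (mid : List Int) :
    (solveStepA (lo :: (mid ++ [hi]))).Pairwise (· ≤ ·) := by
  rw [stepA_eq]
  simpa using PySem.List.sorted_pairwise ((lo + 1) :: (mid ++ [hi - 1])) (fun x => x)

-- mid bounds
theorem mid_bounds (lo hi : Int) (mid : List Int)
    (hp : ((lo :: (mid ++ [hi])) : List Int).Pairwise (· ≤ ·)) :
    ∀ x ∈ mid, lo ≤ x ∧ x ≤ hi := by
  intro x hx
  constructor
  · exact head_le_of_pairwise lo (mid ++ [hi]) hp x (by simp [hx])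
  · have h2 := le_lastD_of_pairwise _ hp x (by simp [hx])
    rwa [lastD_cons_append] at h2

theorem stepA_headD (lo hi : Int) (mid : List Int)
    (hp : ((lo :: (mid ++ [hi])) : List Int).Pairwise (· ≤ ·)) (hs : 2 ≤ hi - lo) :
    (solveStepA (lo :: (mid ++ [hi]))).headD 0 = if mid.count lo = 0 then lo + 1 else lo := by
  have hperm := stepA_perm lo hi mid hp
  have hpw := stepA_pairwise lo hi mid
  have hb := mid_bounds lo hi mid hp
  by_cases hc : mid.count lo = 0
  · rw [if_pos hc]
    apply headD_eq_of_min _ hpw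
    · exact hperm.mem_iff.mpr (by simp)
    · intro x hx
      rcases List.mem_cons.mp (hperm.mem_iff.mp hx) with rfl | hx2
      · exact le_refl _
      · rcases List.mem_append.mp hx2 with hxm | hxl
        · have h1 := (hb x hxm).1
          have hno : lo ∉ mid := List.count_eq_zero.mp hc
          have hne : x ≠ lo := fun h => hno (h ▸ hxm)
          omega
        · simp at hxl; omega
  · rw [if_neg hc]
    apply headD_eq_of_min _ hpw
    · have : lo ∈ mid := List.count_pos_iff.mp (by omega)
      exact hperm.mem_iff.mpr (by simp [this])
    · intro x hx
      rcases List.mem_cons.mp (hperm.mem_iff.mp hx) with rfl | hx2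
      · omega
      · rcases List.mem_append.mp hx2 with hxm | hxl
        · exact (hb x hxm).1
        · simp at hxl; omega

theorem stepA_lastD (lo hi : Int) (mid : List Int)
    (hp : ((lo :: (mid ++ [hi])) : List Int).Pairwise (· ≤ ·)) (hs : 2 ≤ hi - lo) :
    (solveStepA (lo :: (mid ++ [hi]))).getLastD 0 = if mid.count hi = 0 then hi - 1 else hi := by
  have hperm := stepA_perm lo hi mid hp
  have hpw := stepA_pairwise lo hi mid
  have hb := mid_bounds lo hi mid hp
  by_cases hc : mid.count hi = 0
  · rw [if_pos hc]
    apply lastD_eq_of_max _ hpw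
    · exact hperm.mem_iff.mpr (by simp)
    · intro x hx
      rcases List.mem_cons.mp (hperm.mem_iff.mp hx) with rfl | hx2
      · omega
      · rcases List.mem_append.mp hx2 with hxm | hxl
        · have := (hb x hxm).2
          have hne : x ≠ hi := by
            intro h; subst h
            exact absurd (List.count_pos_iff.mpr hxm) (by omega)
          omega
        · simp at hxl; omega
  · rw [if_neg hc]
    apply lastD_eq_of_max _ hpw
    · have : hi ∈ mid := List.count_pos_iff.mp (by omega)
      exact hperm.mem_iff.mpr (by simp [this])
    · intro x hx
      rcases List.mem_cons.mp (hperm.mem_iff.mp hx) with rfl | hx2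
      · omega
      · rcases List.mem_append.mp hx2 with hxm | hxl
        · exact (hb x hxm).2
        · simp at hxl; omega

-- spread-1 sorted lists are fixed points of A's step
theorem stepA_fix_spread1 (s : List Int) (hp : s.Pairwise (· ≤ ·)) (hl : 2 ≤ s.length)
    (h1 : s.getLastD 0 - s.headD 0 = 1) : solveStepA s = s := by
  obtain ⟨mid, hs⟩ := destruct_sorted s hl
  set a := s.headD 0 with ha
  set b := s.getLastD 0 with hb
  rw [hs, stepA_eq]
  have hb1 : b - 1 = a := by omega
  have ha1 : a + 1 = b := by omega
  rw [hb1, ha1]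
  apply PySem.List.sorted_id_eq_of_perm_of_pairwise
  · have h1' : (a :: (mid ++ [b])).Perm (a :: b :: mid) :=
      (List.perm_append_singleton b mid).cons a
    have h2' : (b :: (mid ++ [a])).Perm (b :: a :: mid) :=
      (List.perm_append_singleton a mid).cons b
    have h3' : (b :: a :: mid).Perm (a :: b :: mid) := List.Perm.swap a b mid
    exact h1'.trans (h2'.trans h3').symm
  · exact hs ▸ hp

-- A's step on an all-equal list of length ≥ 2, and the resulting 2-cycle
theorem pairwise_mid_cons_append (c d a : Int) (mid : List Int) (hmid : ∀ x ∈ mid, x = a)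
    (h1 : c ≤ a) (h2 : a ≤ d) (h3 : c ≤ d) :
    ((c :: (mid ++ [d])) : List Int).Pairwise (· ≤ ·) := by
  apply List.pairwise_cons.mpr
  constructor
  · intro x hx
    rcases List.mem_append.mp hx with hxm | hxl
    · rw [hmid x hxm]; exact h1
    · simp at hxl; omega
  · apply List.pairwise_append.mpr
    refine ⟨?_, by simp, ?_⟩
    · apply List.pairwise_of_forall_mem_list
      intro x hx y hy
      rw [hmid x hx, hmid y hy]
    · intro x hx y hy
      simp at hy
      rw [hmid x hx, hy]; exact h2

theorem stepA_const (a : Int) (mid : List Int) (hmid : ∀ x ∈ mid, x = a) :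
    solveStepA (a :: (mid ++ [a])) = (a - 1) :: (mid ++ [a + 1]) := by
  rw [stepA_eq]
  apply PySem.List.sorted_id_eq_of_perm_of_pairwise
  · have h1' : ((a + 1) :: (mid ++ [a - 1])).Perm ((a + 1) :: (a - 1) :: mid) :=
      (List.perm_append_singleton (a - 1) mid).cons (a + 1)
    have h2' : ((a - 1) :: (mid ++ [a + 1])).Perm ((a - 1) :: (a + 1) :: mid) :=
      (List.perm_append_singleton (a + 1) mid).cons (a - 1)
    have h3' : ((a + 1) :: (a - 1) :: mid).Perm ((a - 1) :: (a + 1) :: mid) :=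
      List.Perm.swap (a - 1) (a + 1) mid
    exact h2'.trans (h1'.trans h3').symm
  · exact pairwise_mid_cons_append (a - 1) (a + 1) a mid hmid (by omega) (by omega) (by omega)

theorem stepA_const2 (a : Int) (mid : List Int) (hmid : ∀ x ∈ mid, x = a) :
    solveStepA ((a - 1) :: (mid ++ [a + 1])) = a :: (mid ++ [a]) := by
  rw [stepA_eq]
  have h1 : a - 1 + 1 = a := by ring
  have h2 : a + 1 - 1 = a := by ring
  rw [h1, h2]
  exact PySem.List.sorted_eq_self_of_pairwise _ _
    (by simpa using pairwise_mid_cons_append a a a mid hmid (by omega) (by omega) (by omega))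

theorem loopB_eq (cnt : PySem.Dict Int Int) (lo hi r : Int) (h : 0 < r ∧ 2 ≤ hi - lo) :
    loopB cnt lo hi r =
      loopB (shiftB (shiftB cnt lo 1).1 hi (-1)).1 (shiftB cnt lo 1).2
        (shiftB (shiftB cnt lo 1).1 hi (-1)).2 (r - 1) := by
  rw [loopB]; rw [dif_pos h]

theorem find_filter_self (l : List (Int × Int)) (k : Int) :
    (l.filter (fun p => !(p.1 == k))).find? (fun p => p.1 == k) = none := by
  induction l with
  | nil => rfl
  | cons p t ih =>
    rw [List.filter_cons]
    by_cases h : p.1 = k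
    · have hb : (!(p.1 == k)) = false := by simp [h]
      rw [hb]
      simp only [Bool.false_eq_true, if_false]
      exact ih
    · have hb : (!(p.1 == k)) = true := by simp [h]
      rw [hb, if_pos rfl, List.find?_cons_of_neg (by simp [h])]
      exact ih

theorem find_filter_ne (l : List (Int × Int)) (k x : Int) (h : x ≠ k) :
    (l.filter (fun p => !(p.1 == k))).find? (fun p => p.1 == x)
      = l.find? (fun p => p.1 == x) := by
  induction l with
  | nil => rfl
  | cons p t ih =>
    rw [List.filter_cons]
    by_cases h1 : p.1 = k
    · have hb : (!(p.1 == k)) = false := by simp [h1]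
      have h2 : ¬ (p.1 = x) := by rw [h1]; exact fun hx => h hx.symm
      rw [hb]
      simp only [Bool.false_eq_true, if_false]
      rw [ih, List.find?_cons_of_neg (by simp [h2])]
    · have hb : (!(p.1 == k)) = true := by simp [h1]
      rw [hb, if_pos rfl]
      by_cases h2 : p.1 = x
      · rw [List.find?_cons_of_pos (by simp [h2]), List.find?_cons_of_pos (by simp [h2])]
      · rw [List.find?_cons_of_neg (by simp [h2]), List.find?_cons_of_neg (by simp [h2])]
        exact ih

theorem getD_erase (d : PySem.Dict Int Int) (k x d0 : Int) :
    (d.erase k).getD x d0 = if x = k then d0 else d.getD x d0 := by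
  simp only [PySem.Dict.erase, PySem.Dict.getD, PySem.Dict.get?]
  by_cases h : x = k
  · subst h; rw [if_pos rfl, find_filter_self]; rfl
  · rw [if_neg h, find_filter_ne _ _ _ h]

theorem shiftB_getD (c : PySem.Dict Int Int) (k d y : Int) (hd : d ≠ 0) :
    (shiftB c k d).1.getD y 0
      = c.getD y 0 - (if y = k then 1 else 0) + (if y = k + d then 1 else 0) := by
  have hkd : k ≠ k + d := by omega
  have hcond : ((c.insert k (c.getD k 0 - 1)).insert (k + d)
      ((c.insert k (c.getD k 0 - 1)).getD (k + d) 0 + 1)).getD k 0 = c.getD k 0 - 1 := by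
    rw [PySem.Dict.getD_insert, if_neg hkd, PySem.Dict.getD_insert, if_pos rfl]
  simp only [shiftB, beq_iff_eq, hcond]
  split_ifs <;> (try subst y) <;> dsimp only <;>
    simp only [getD_erase, PySem.Dict.getD_insert] <;>
    (try split_ifs) <;> (try subst y) <;> omega

theorem shiftB_k (c : PySem.Dict Int Int) (k d : Int) (hd : d ≠ 0) :
    (shiftB c k d).2 = if c.getD k 0 - 1 = 0 then k + d else k := by
  simp only [shiftB, beq_iff_eq, PySem.Dict.getD_insert]
  split_ifs <;> first | rfl | omega

theorem stepB_getD (cnt : PySem.Dict Int Int) (lo hi : Int) (hs : 2 ≤ hi - lo) (x : Int) :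
    (shiftB (shiftB cnt lo 1).1 hi (-1)).1.getD x 0 =
      cnt.getD x 0 - (if x = lo then 1 else 0) + (if x = lo + 1 then 1 else 0)
        - (if x = hi then 1 else 0) + (if x = hi - 1 then 1 else 0) := by
  rw [shiftB_getD _ _ _ _ (by omega), shiftB_getD _ _ _ _ (by omega)]
  simp only [show hi + (-1 : Int) = hi - 1 from by ring]
  try ring

theorem stepB_lo (cnt : PySem.Dict Int Int) (lo hi : Int) (hs : 2 ≤ hi - lo) :
    (shiftB cnt lo 1).2 = if cnt.getD lo 0 - 1 = 0 then lo + 1 else lo :=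
  shiftB_k cnt lo 1 (by omega)

theorem stepB_hi (cnt : PySem.Dict Int Int) (lo hi : Int) (hs : 2 ≤ hi - lo) :
    (shiftB (shiftB cnt lo 1).1 hi (-1)).2
      = if cnt.getD hi 0 - 1 = 0 then hi - 1 else hi := by
  rw [shiftB_k _ _ _ (by omega), shiftB_getD _ _ _ _ (by omega)]
  rw [if_neg (by omega : ¬ hi = lo), if_neg (by omega : ¬ hi = lo + 1)]
  split_ifs <;> first | rfl | omega

theorem loopB_eq_base (cnt : PySem.Dict Int Int) (lo hi r : Int) (h : ¬ (0 < r ∧ 2 ≤ hi - lo)) :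
    loopB cnt lo hi r = (lo, hi, r) := by
  rw [loopB]; rw [dif_neg h]


theorem length_stepA (s : List Int) : (solveStepA s).length = s.length := by
  simp [solveStepA, PySem.List.length_sorted]

theorem iterate_two_cycle {α : Type} (f : α → α) (s : α) (h : f (f s) = s) :
    ∀ n, f^[n] s = if n % 2 = 0 then s else f s := by
  intro n
  induction n with
  | zero => simp
  | succ n ih =>
    rw [Function.iterate_succ_apply', ih]
    by_cases hp : n % 2 = 0
    · rw [if_pos hp, if_neg (by omega)]
    · rw [if_neg hp, if_pos (by omega), h]

theorem mod_parity (r : Int) (h : 0 < r) : (PySem.Int.mod r 2 = 1) ↔ (r.toNat % 2 = 1) := by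
  rw [PySem.Int.mod_eq_emod_of_pos (show (0:Int) < 2 by omega)]
  omega

theorem count_cons_append (a b x : Int) (mid : List Int) :
    (((a :: (mid ++ [b])) : List Int).count x : Int)
      = (mid.count x : Int) + (if x = a then 1 else 0) + (if x = b then 1 else 0) := by
  simp [List.count_cons, List.count_append]
  split_ifs <;> push_cast <;> omega

-- B's final answer expression on the loop's result
def answerB (res : Int × Int × Int) : Int :=
  if res.2.1 - res.1 == 1 then 1
  else if res.2.1 == res.1 then
    (if 0 < res.2.2 ∧ PySem.Int.mod res.2.2 2 = 1 then 2 else 0)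
  else res.2.1 - res.1

theorem solve_alt_eq (boxs : List Int) (l m : Int) (h : (boxs.length == 1) = false) :
    solve_alt boxs l m = answerB (loopB (buildCnt boxs)
      ((PySem.List.min? boxs (fun x => x)).getD 0)
      ((PySem.List.max? boxs (fun x => x)).getD 0) m) := by
  simp only [solve_alt, h, Bool.false_eq_true, if_false, answerB]

-- the main loop invariant: B's loop state (cnt, lo, hi, r) represents the sorted list s
-- (cnt = its counts, lo/hi = its ends) and then B's final answer equals the spread of
-- A's state after the remaining r steps
theorem core : ∀ (k : Nat) (r : Int), r.toNat = k →
    ∀ (s : List Int) (cnt : PySem.Dict Int Int) (lo hi : Int),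
    s.Pairwise (· ≤ ·) → 2 ≤ s.length → (∀ x, cnt.getD x 0 = (s.count x : Int)) →
    s.headD 0 = lo → s.getLastD 0 = hi →
    answerB (loopB cnt lo hi r)
      = (solveStepA^[r.toNat] s).getLastD 0 - (solveStepA^[r.toNat] s).headD 0 := by
  intro k
  induction k using Nat.strong_induction_on with
  | _ k ih =>
    intro r hrk s cnt lo hi hp hl hc hh ht
    have hne : s ≠ [] := by intro h; subst h; simp at hl
    have hdle : lo ≤ hi := hh ▸ ht ▸ headD_le_lastD s hp hne
    by_cases hcond : 0 < r ∧ 2 ≤ hi - lo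
    · -- transfer step
      obtain ⟨mid, hs⟩ := destruct_sorted s hl
      rw [hh, ht] at hs
      subst hs
      rw [loopB_eq _ _ _ _ hcond]
      have hnat : r.toNat = (r - 1).toNat + 1 := by omega
      rw [hnat, Function.iterate_succ_apply]
      have hperm := stepA_perm lo hi mid hp
      have hcount_t : ∀ x, ((solveStepA (lo :: (mid ++ [hi]))).count x : Int)
          = (mid.count x : Int) + (if x = lo + 1 then 1 else 0) + (if x = hi - 1 then 1 else 0) := by
        intro x
        rw [hperm.count_eq]
        exact count_cons_append _ _ _ _
      have hlelo : lo ≠ hi := by omega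
      refine ih ((r - 1).toNat) (by omega) (r - 1) rfl _ _ _ _
        (stepA_pairwise lo hi mid) ?_ ?_ ?_ ?_
      · have hle := hperm.length_eq
        simp at hle
        omega
      · intro x
        rw [stepB_getD _ _ _ hcond.2 x, hc x, count_cons_append, hcount_t x]
        split_ifs <;> omega
      · rw [stepB_lo _ _ _ hcond.2, hc lo, count_cons_append,
          stepA_headD lo hi mid hp hcond.2]
        split_ifs <;> first | rfl | omega
      · rw [stepB_hi _ _ _ hcond.2, hc hi, count_cons_append,
          stepA_lastD lo hi mid hp hcond.2]
        split_ifs <;> first | rfl | omega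
    · rw [loopB_eq_base _ _ _ _ hcond]
      by_cases hr : 0 < r
      · have hsp : hi - lo < 2 := by omega
        by_cases h1 : hi - lo = 1
        · have hfix := stepA_fix_spread1 s hp hl (by omega)
          rw [Function.iterate_fixed hfix, hh, ht]
          have hA : answerB (lo, hi, r) = 1 := by simp [answerB, h1]
          omega
        · have h0 : hi = lo := by omega
          have hall : ∀ x ∈ s, x = lo := all_eq_of_ends s hp lo hh (h0 ▸ ht)
          obtain ⟨mid, hs⟩ := destruct_sorted s hl
          rw [hh, ht, h0] at hs
          have hmid : ∀ x ∈ mid, x = lo := fun x hx => hall x (by rw [hs]; simp [hx])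
          have hcyc : solveStepA (solveStepA s) = s := by
            rw [hs, stepA_const lo mid hmid, stepA_const2 lo mid hmid]
          rw [iterate_two_cycle _ _ hcyc]
          by_cases hpar : r.toNat % 2 = 0
          · rw [if_pos hpar, hh, ht]
            have hm : ¬ (PySem.Int.mod r 2 = 1) := by rw [mod_parity r hr]; omega
            have hA : answerB (lo, hi, r) = 0 := by
              simp only [answerB, beq_iff_eq]
              rw [if_neg (by omega), if_pos (by omega), if_neg (fun hx => hm hx.2)]
            omega
          · rw [if_neg hpar]
            rw [hs, stepA_const lo mid hmid, lastD_cons_append]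
            have hm : PySem.Int.mod r 2 = 1 := (mod_parity r hr).mpr (by omega)
            have hA : answerB (lo, hi, r) = 2 := by
              simp only [answerB, beq_iff_eq]
              rw [if_neg (by omega), if_pos (by omega), if_pos ⟨hr, hm⟩]
            simp only [List.headD_cons, hA]
            omega
      · have hr0 : r.toNat = 0 := by omega
        rw [hr0]
        simp only [Function.iterate_zero, id_eq]
        rw [hh, ht]
        simp only [answerB, beq_iff_eq]
        split_ifs with ha hb hcnd
        · omega
        · exact absurd hcnd.1 hr
        · omega
        · rfl

-- min()/max() of boxs are the ends of sorted(boxs)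
theorem min_eq_head (boxs : List Int) (hne : boxs ≠ []) :
    (PySem.List.min? boxs (fun x => x)).getD 0
      = (PySem.List.sorted boxs (fun x => x) false).headD 0 := by
  cases hmq : PySem.List.min? boxs (fun x => x) with
  | none => exact absurd ((PySem.List.min?_eq_none_iff boxs (fun x => x)).mp hmq) hne
  | some v =>
    have hmem : v ∈ boxs := PySem.List.min?_mem hmq
    have hmin := PySem.List.min?_isMin hmq
    simp only [Option.getD_some]
    exact (headD_eq_of_min _ (by simpa using PySem.List.sorted_pairwise boxs (fun x => x)) v
      ((PySem.List.mem_sorted _ _ _ _).mpr hmem)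
      (fun x hx => hmin x ((PySem.List.mem_sorted _ _ _ _).mp hx))).symm

theorem max_eq_last (boxs : List Int) (hne : boxs ≠ []) :
    (PySem.List.max? boxs (fun x => x)).getD 0
      = (PySem.List.sorted boxs (fun x => x) false).getLastD 0 := by
  cases hmq : PySem.List.max? boxs (fun x => x) with
  | none => exact absurd ((PySem.List.max?_eq_none_iff boxs (fun x => x)).mp hmq) hne
  | some v =>
    have hmem : v ∈ boxs := PySem.List.max?_mem hmq
    have hmax := PySem.List.max?_isMax hmq
    simp only [Option.getD_some]
    exact (lastD_eq_of_max _ (by simpa using PySem.List.sorted_pairwise boxs (fun x => x)) v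
      ((PySem.List.mem_sorted _ _ _ _).mpr hmem)
      (fun x hx => hmax x ((PySem.List.mem_sorted _ _ _ _).mp hx))).symm

theorem cnt_counts (boxs : List Int) (x : Int) :
    (buildCnt boxs).getD x 0 = ((PySem.List.sorted boxs (fun x => x) false).count x : Int) := by
  unfold buildCnt
  rw [PySem.Dict.getD_foldl_insert_add_one]
  rw [(PySem.List.sorted_perm boxs (fun x => x) false).count_eq]
  simp [PySem.Dict.getD_empty]

theorem solve_unfold (boxs : List Int) (l m : Int) :
    solve boxs l m =
      (solveStepA^[m.toNat] (PySem.List.sorted boxs (fun x => x) false)).getD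
        ((solveStepA^[m.toNat] (PySem.List.sorted boxs (fun x => x) false)).length - 1) 0
      - (solveStepA^[m.toNat] (PySem.List.sorted boxs (fun x => x) false)).getD 0 0 := by
  simp only [solve]
  rw [foldl_ignore, PySem.List.length_pyRange_one]
  norm_num

theorem length_iterate_stepA (n : Nat) (s : List Int) : (solveStepA^[n] s).length = s.length := by
  induction n generalizing s with
  | zero => rfl
  | succ n ihn => rw [Function.iterate_succ_apply, ihn, length_stepA]

-- ===== VERDICT (by name: the statement is the Claim_ definition above) =====
theorem solve_spec : Claim_equal_solve := by
  intro boxs l m _ hpre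
  unfold Spec_solve
  have hp : (PySem.List.sorted boxs (fun x => x) false).Pairwise (· ≤ ·) := by
    simpa using PySem.List.sorted_pairwise boxs (fun x => x)
  have hsne : PySem.List.sorted boxs (fun x => x) false ≠ [] := by
    simpa [PySem.List.sorted_eq_nil_iff] using hpre
  rw [solve_unfold]
  by_cases hlen : boxs.length = 1
  · obtain ⟨a, hs⟩ : ∃ a, PySem.List.sorted boxs (fun x => x) false = [a] := by
      have := PySem.List.length_sorted boxs (fun x => x) false
      cases hsc : PySem.List.sorted boxs (fun x => x) false with
      | nil => exact absurd hsc hsne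
      | cons c t =>
        rw [hsc] at this
        cases t with
        | nil => exact ⟨c, rfl⟩
        | cons d u => simp at this; omega
    rw [hs, Function.iterate_fixed (stepA_singleton a)]
    simp [solve_alt, hlen]
  · have hl2 : 2 ≤ (PySem.List.sorted boxs (fun x => x) false).length := by
      have := PySem.List.length_sorted boxs (fun x => x) false
      have hpos : 0 < boxs.length := List.length_pos_of_ne_nil hpre
      omega
    rw [solve_alt_eq boxs l m (by simpa using hlen)]
    rw [min_eq_head boxs hpre, max_eq_last boxs hpre]
    rw [core m.toNat m rfl _ _ _ _ hp hl2 (cnt_counts boxs) rfl rfl]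
    obtain ⟨a, t, hf⟩ : ∃ a t, solveStepA^[m.toNat] (PySem.List.sorted boxs (fun x => x) false) = a :: t := by
      have hlf := length_iterate_stepA m.toNat (PySem.List.sorted boxs (fun x => x) false)
      cases hc : solveStepA^[m.toNat] (PySem.List.sorted boxs (fun x => x) false) with
      | nil => rw [hc] at hlf; simp only [List.length_nil] at hlf; omega
      | cons a t => exact ⟨a, t, rfl⟩
    rw [hf, getD_pred_eq_getLastD]
    simp
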